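-- pv_equiv track=rewrite | github.com/KirillZhabin/Codewars | 5 kyu/Max Collatz Sequence Length.py | max_collatz_length
-- ===== SOURCE A (Python) =====
-- def max_collatz_length(n):
--     if type(n) != int or n < 1:
--         return []
--     seq, max_len, max_num = [0] * n, 0, 0
--     for x in range(1, n + 1):
--         if seq[x - 1]:
--             continue
--         i, l = x, 1
--         while x > 1:
--             if x % 2:
--                 x = x // 2 * 3 + 2
--                 l += 2
--             else:
--                 x //= 2
--                 l += 1
--             if x <= n and seq[x - 1]:
--                 l += seq[x - 1] - 1
--                 break
--         seq[i - 1] = l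
--         if l > max_len:
--             max_len, max_num = l, i
--     return [max_num, max_len]
-- ===== SOURCE B (Python) =====
-- def max_collatz_length(n):
--     if type(n) != int or n < 1:
--         return []
--     memo = {1: 1}
--     best_num, best_len = 0, 0
--     for k in range(1, n + 1):
--         path = []
--         x = k
--         while x not in memo:
--             path.append(x)
--             x = x // 2 if x % 2 == 0 else 3 * x + 1
--         base = memo[x]
--         for i, v in enumerate(reversed(path)):
--             memo[v] = base + i + 1
--         length = base + len(path)
--         if length > best_len:
--             best_len, best_num = length, k
--     return [best_num, best_len]
-- ===== Notes on version B (the rewrite author's own statement) =====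
-- stated objective: alternative
-- what changed: Replaces A's preallocated array memo of size n (entries only for start values up to n, combined odd Collatz step counted as two, early break adding the stored remainder) with a dict memo keyed by EVERY value ever visited: each start walks plain uncombined Collatz steps collecting its path until it hits a memoized value, then backfills the whole path into the dict; the best (smallest number, strict greater-than tie-break) is tracked the same way.
import Mathlib
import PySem

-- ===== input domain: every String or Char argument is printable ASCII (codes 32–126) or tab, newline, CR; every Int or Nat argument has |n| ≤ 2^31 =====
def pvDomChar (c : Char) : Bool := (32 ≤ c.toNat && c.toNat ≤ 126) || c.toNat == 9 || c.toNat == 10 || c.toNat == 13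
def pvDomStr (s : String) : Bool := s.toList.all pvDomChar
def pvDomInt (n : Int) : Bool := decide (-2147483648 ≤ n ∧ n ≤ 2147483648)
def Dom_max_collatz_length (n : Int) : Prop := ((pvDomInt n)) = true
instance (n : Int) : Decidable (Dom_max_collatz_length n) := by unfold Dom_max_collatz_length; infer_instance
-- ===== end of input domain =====

-- B replaces A's length-n array memo (combined odd steps, early break) with a dict memo over every
-- visited value, walking plain Collatz steps and backfilling whole paths: an alternative memoization
-- strategy of similar cost.  Both ports are made total by a fuel guard bounding the computed sequence
-- length (return [] on exhaustion, never reached for any input whose Collatz lengths stay below 10^9).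


-- ===== PORT A =====
-- fuel guard (totality only): bounds the length of the computed Collatz sequence
def pvFuelA : Nat := 1000000000

-- inner `while x > 1` loop of A: combined odd step, memo break; l counts the sequence length.
-- fuel decreases by exactly the amount added to l; `none` = fuel exhausted.
def pvALoop (n : Int) (seq : List Int) : Nat → Int → Int → Option Int
  | f, x, l =>
    if x ≤ 1 then some l
    else match f with
    | 0 => none
    | f1+1 =>
      if PySem.Int.mod x 2 ≠ 0 then
        match f1 with
        | 0 => none
        | f2+1 =>
          let x' := PySem.Int.floordiv x 2 * 3 + 2
          let l' := l + 2
          let v := if x' ≤ n then PySem.List.pyGetD seq (x' - 1) 0 else 0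
          if v ≠ 0 then (if v - 1 ≤ (f2 : Int) then some (l' + v - 1) else none)
          else pvALoop n seq f2 x' l'
      else
        let x' := PySem.Int.floordiv x 2
        let l' := l + 1
        let v := if x' ≤ n then PySem.List.pyGetD seq (x' - 1) 0 else 0
        if v ≠ 0 then (if v - 1 ≤ (f1 : Int) then some (l' + v - 1) else none)
        else pvALoop n seq f1 x' l'

-- one iteration of A's `for x in range(1, n+1)` loop over state (seq, max_len, max_num)
def pvAStep (n : Int) (st : Option (List Int × Int × Int)) (x : Int) : Option (List Int × Int × Int) :=
  match st with
  | none => none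
  | some (seq, maxLen, maxNum) =>
    if PySem.List.pyGetD seq (x - 1) 0 ≠ 0 then some (seq, maxLen, maxNum)  -- continue
    else
      match pvALoop n seq pvFuelA x 1 with
      | none => none
      | some l =>
        let seq' := PySem.List.pySetD seq (x - 1) l
        if l > maxLen then some (seq', l, x) else some (seq', maxLen, maxNum)

def max_collatz_length (n : Int) : List Int :=
  if n < 1 then []
  else
    match (PySem.List.pyRange 1 (n + 1) 1).foldl (pvAStep n) (some (List.replicate n.toNat 0, 0, 0)) with
    | none => []  -- fuel guard tripped
    | some (_, maxLen, maxNum) => [maxNum, maxLen]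

-- ===== PORT B =====
def pvFuelB : Nat := 1000000000

-- B's `while x not in memo` walk: plain steps, collects the path; `none` = fuel exhausted
-- (at a memo hit the stored remaining length must also fit in the remaining fuel).
def pvBWalk (memo : PySem.Dict Int Int) : Nat → Int → List Int → Option (List Int × Int)
  | f, x, path =>
    match memo.get? x with
    | some v => if v - 1 ≤ (f : Int) then some (path, v) else none
    | none =>
      match f with
      | 0 => none
      | f1+1 =>
        let x' := if PySem.Int.mod x 2 = 0 then PySem.Int.floordiv x 2 else 3 * x + 1
        pvBWalk memo f1 x' (path ++ [x])

-- one iteration of B's `for k in range(1, n+1)` loop over state (memo, best_len, best_num)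
def pvBStep (st : Option (PySem.Dict Int Int × Int × Int)) (k : Int) : Option (PySem.Dict Int Int × Int × Int) :=
  match st with
  | none => none
  | some (memo, bestLen, bestNum) =>
    match pvBWalk memo pvFuelB k [] with
    | none => none
    | some (path, base) =>
      let memo' := (PySem.List.enumerate path.reverse 0).foldl
        (fun d p => d.insert p.2 (base + p.1 + 1)) memo
      let length := base + PySem.List.len path
      if length > bestLen then some (memo', length, k) else some (memo', bestLen, bestNum)

def max_collatz_length_alt (n : Int) : List Int :=
  if n < 1 then []
  else
    match (PySem.List.pyRange 1 (n + 1) 1).foldl pvBStep (some (PySem.Dict.ofList [(1, 1)], 0, 0)) with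
    | none => []  -- fuel guard tripped
    | some (_, bestLen, bestNum) => [bestNum, bestLen]

-- ===== PRECONDITION & SPEC =====
def Spec_max_collatz_length (n : Int) (out : List Int) : Prop := out = max_collatz_length_alt n
instance (n : Int) (out : List Int) : Decidable (Spec_max_collatz_length n out) := by unfold Spec_max_collatz_length; infer_instance

-- ===== CLAIM (what is proved, stated in full; the proofs are below) =====
def Claim_equal_max_collatz_length : Prop := ∀ (n : Int), Dom_max_collatz_length n → Spec_max_collatz_length n (max_collatz_length n)

-- ===== LEMMAS AND PROOFS =====

-- one plain Collatz step
def pvStep (x : Int) : Int := if PySem.Int.mod x 2 = 0 then PySem.Int.floordiv x 2 else 3 * x + 1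

-- canonical fuelled Collatz sequence length (fuel = number of plain steps allowed)
def pvLen : Nat → Int → Option Int
  | f, x =>
    if x ≤ 1 then some 1
    else match f with
    | 0 => none
    | f1+1 => (pvLen f1 (pvStep x)).map (· + 1)

def pvC (x : Int) : Option Int := pvLen pvFuelA x

theorem pvLen_of_le (f : Nat) (x : Int) (hx : x ≤ 1) : pvLen f x = some 1 := by
  cases f <;> simp [pvLen, hx]

theorem pvLen_succ (f : Nat) (x : Int) (hx : ¬ x ≤ 1) :
    pvLen (f+1) x = (pvLen f (pvStep x)).map (· + 1) := by
  simp [pvLen, hx]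

theorem pvLen_zero (x : Int) (hx : ¬ x ≤ 1) : pvLen 0 x = none := by
  simp [pvLen, hx]

theorem pvLen_mono {f f' : Nat} {x v : Int} (h : pvLen f x = some v) (hf : f ≤ f') :
    pvLen f' x = some v := by
  induction f generalizing x v f' with
  | zero =>
    by_cases hx : x ≤ 1
    · rw [pvLen_of_le _ _ hx] at h ⊢; exact h
    · rw [pvLen_zero _ hx] at h; exact absurd h (by simp)
  | succ f ih =>
    by_cases hx : x ≤ 1
    · rw [pvLen_of_le _ _ hx] at h ⊢; exact h
    · rw [pvLen_succ _ _ hx] at h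
      obtain ⟨f', rfl⟩ : ∃ g, f' = g + 1 := ⟨f' - 1, by omega⟩
      rw [pvLen_succ _ _ hx]
      obtain ⟨w, hw, rfl⟩ := Option.map_eq_some_iff.mp h
      rw [ih hw (by omega)]; rfl

theorem pvLen_bounds {f : Nat} {x v : Int} (h : pvLen f x = some v) :
    1 ≤ v ∧ v ≤ (f : Int) + 1 := by
  induction f generalizing x v with
  | zero =>
    by_cases hx : x ≤ 1
    · rw [pvLen_of_le _ _ hx] at h; simp at h; omega
    · rw [pvLen_zero _ hx] at h; exact absurd h (by simp)
  | succ f ih =>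
    by_cases hx : x ≤ 1
    · rw [pvLen_of_le _ _ hx] at h; simp at h; omega
    · rw [pvLen_succ _ _ hx] at h
      obtain ⟨w, hw, rfl⟩ := Option.map_eq_some_iff.mp h
      have := ih hw; push_cast; omega

theorem pvLen_min {f : Nat} {x v : Int} (h : pvLen f x = some v) :
    pvLen (v - 1).toNat x = some v := by
  induction f generalizing x v with
  | zero =>
    by_cases hx : x ≤ 1
    · rw [pvLen_of_le _ _ hx] at h; rw [pvLen_of_le _ _ hx]; exact h
    · rw [pvLen_zero _ hx] at h; exact absurd h (by simp)
  | succ f ih =>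
    by_cases hx : x ≤ 1
    · rw [pvLen_of_le _ _ hx] at h; rw [pvLen_of_le _ _ hx]; exact h
    · rw [pvLen_succ _ _ hx] at h
      obtain ⟨w, hw, rfl⟩ := Option.map_eq_some_iff.mp h
      have hb := pvLen_bounds hw
      have : (w + 1 - 1).toNat = (w - 1).toNat + 1 := by omega
      rw [this, pvLen_succ _ _ hx, ih hw]; rfl

-- the guard `v - 1 ≤ f` decides pvLen at fuel f, given pvC x = some v and f ≤ pvFuelA
theorem pvLen_char {f : Nat} {x v : Int} (hC : pvC x = some v) (hf : f ≤ pvFuelA) :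
    pvLen f x = if v - 1 ≤ (f : Int) then some v else none := by
  have hb := pvLen_bounds hC
  split
  · exact pvLen_mono (pvLen_min hC) (by omega)
  · rename_i hlt
    cases hw : pvLen f x with
    | none => rfl
    | some w =>
      have : pvLen pvFuelA x = some w := pvLen_mono hw hf
      rw [pvC] at hC; rw [hC] at this
      have hbw := pvLen_bounds hw
      simp at this; omega

-- combined odd step: for odd x > 1, two plain steps land on x//2*3+2
theorem pvLen_odd (f : Nat) (x : Int) (hx : ¬ x ≤ 1) (ho : PySem.Int.mod x 2 ≠ 0) :
    pvLen (f+2) x = (pvLen f (PySem.Int.floordiv x 2 * 3 + 2)).map (· + 2) := by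
  have hq := PySem.Int.floordiv_mul_add_mod x 2
  have hm0 : 0 ≤ PySem.Int.mod x 2 := PySem.Int.mod_nonneg x (by norm_num)
  have hm2 : PySem.Int.mod x 2 < 2 := PySem.Int.mod_lt x (by norm_num)
  have hm1 : PySem.Int.mod x 2 = 1 := by omega
  have hxq : x = PySem.Int.floordiv x 2 * 2 + 1 := by omega
  have hstep1 : pvStep x = 3 * x + 1 := by unfold pvStep; rw [if_neg ho]
  have hpos : ¬ (3 * x + 1 ≤ 1) := by omega
  have heven : PySem.Int.mod (3 * x + 1) 2 = 0 := by
    rw [PySem.Int.mod_eq_zero_iff_dvd]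
    exact ⟨PySem.Int.floordiv x 2 * 3 + 2, by omega⟩
  have hdiv : PySem.Int.floordiv (3 * x + 1) 2 = PySem.Int.floordiv x 2 * 3 + 2 := by
    rw [PySem.Int.floordiv_eq_iff_of_pos (by norm_num)]
    constructor <;> omega
  have hstep2 : pvStep (3 * x + 1) = PySem.Int.floordiv x 2 * 3 + 2 := by
    unfold pvStep; rw [if_pos heven]; exact hdiv
  rw [show f + 2 = (f + 1) + 1 from rfl, pvLen_succ _ _ hx, hstep1,
    pvLen_succ _ _ hpos, hstep2]
  cases pvLen f (PySem.Int.floordiv x 2 * 3 + 2) with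
  | none => rfl
  | some w => simp only [Option.map_some]; congr 1; ring

theorem pvLen_even (f : Nat) (x : Int) (hx : ¬ x ≤ 1) (he : PySem.Int.mod x 2 = 0) :
    pvLen (f+1) x = (pvLen f (PySem.Int.floordiv x 2)).map (· + 1) := by
  rw [pvLen_succ _ _ hx]
  simp [pvStep, (PySem.Int.mod_eq_zero_iff_dvd x 2).mp he]

-- the A-side memo is correct wherever it is non-zero
def pvSeqOK (seq : List Int) : Prop :=
  ∀ j (h : j < seq.length), seq[j] ≠ 0 → pvC ((j : Int) + 1) = some seq[j]

theorem pvALoop_spec (n : Int) (seq : List Int) (hseq : pvSeqOK seq)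
    (hlen : seq.length = n.toNat) :
    ∀ f, f ≤ pvFuelA → ∀ x l, pvALoop n seq f x l = (pvLen f x).map (fun t => l + t - 1) := by
  have hv : ∀ x' : Int, 1 ≤ x' →
      (if x' ≤ n then PySem.List.pyGetD seq (x' - 1) 0 else 0) ≠ 0 →
      pvC x' = some (if x' ≤ n then PySem.List.pyGetD seq (x' - 1) 0 else 0) := by
    intro x' h1 hne
    by_cases hle : x' ≤ n
    · rw [if_pos hle] at hne ⊢
      have h0 : (0 : Int) ≤ x' - 1 := by omega
      have hL : x' - 1 < (seq.length : Int) := by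
        rw [hlen]; omega
      rw [PySem.List.pyGetD_eq_getElem seq 0 h0 hL] at hne ⊢
      have := hseq (x' - 1).toNat (by omega) hne
      have hc : (((x' - 1).toNat : Int)) + 1 = x' := by omega
      rwa [hc] at this
    · rw [if_neg hle] at hne; exact absurd rfl hne
  intro f
  induction f using Nat.strong_induction_on with
  | _ f ih =>
    intro hf x l
    by_cases hx : x ≤ 1
    · rw [pvLen_of_le _ _ hx]; unfold pvALoop; rw [if_pos hx]; simp
    · have hx2 : 2 ≤ x := by omega
      have hmb := PySem.Int.floordiv_mul_add_mod x 2
      have hm0 : 0 ≤ PySem.Int.mod x 2 := PySem.Int.mod_nonneg x (by norm_num)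
      have hm2 : PySem.Int.mod x 2 < 2 := PySem.Int.mod_lt x (by norm_num)
      cases f with
      | zero => rw [pvLen_zero _ hx]; unfold pvALoop; rw [if_neg hx]; rfl
      | succ f1 =>
        by_cases ho : PySem.Int.mod x 2 ≠ 0
        · cases f1 with
          | zero =>
            have hst : pvStep x = 3 * x + 1 := by unfold pvStep; rw [if_neg ho]
            rw [pvLen_succ _ _ hx, hst, pvLen_zero _ (by omega)]
            unfold pvALoop; rw [if_neg hx]; dsimp only; rw [if_pos ho]; rfl
          | succ f2 =>
            have hq1 : 1 ≤ PySem.Int.floordiv x 2 := by omega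
            have hx1 : 1 ≤ PySem.Int.floordiv x 2 * 3 + 2 := by omega
            rw [show f2 + 1 + 1 = f2 + 2 from rfl, pvLen_odd f2 x hx ho]
            unfold pvALoop; rw [if_neg hx]; dsimp only; rw [if_pos ho]
            by_cases hvz : (if PySem.Int.floordiv x 2 * 3 + 2 ≤ n then
                PySem.List.pyGetD seq (PySem.Int.floordiv x 2 * 3 + 2 - 1) 0 else 0) ≠ 0
            · rw [if_pos hvz]
              have hC := hv _ hx1 hvz
              rw [pvLen_char hC (by omega : f2 ≤ pvFuelA)]
              by_cases hg : (if PySem.Int.floordiv x 2 * 3 + 2 ≤ n then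
                  PySem.List.pyGetD seq (PySem.Int.floordiv x 2 * 3 + 2 - 1) 0 else 0) - 1 ≤ (f2 : Int)
              · rw [if_pos hg, if_pos hg]; simp only [Option.map_some]; congr 1; ring
              · rw [if_neg hg, if_neg hg]; rfl
            · rw [if_neg hvz]
              rw [ih f2 (by omega) (by omega) _ (l + 2)]
              cases pvLen f2 (PySem.Int.floordiv x 2 * 3 + 2) with
              | none => rfl
              | some w => simp only [Option.map_some]; congr 1; ring
        · have hx1 : 1 ≤ PySem.Int.floordiv x 2 := by omega
          rw [pvLen_even f1 x hx (by omega)]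
          unfold pvALoop; rw [if_neg hx]; dsimp only; rw [if_neg ho]
          by_cases hvz : (if PySem.Int.floordiv x 2 ≤ n then
              PySem.List.pyGetD seq (PySem.Int.floordiv x 2 - 1) 0 else 0) ≠ 0
          · rw [if_pos hvz]
            have hC := hv _ hx1 hvz
            rw [pvLen_char hC (by omega : f1 ≤ pvFuelA)]
            by_cases hg : (if PySem.Int.floordiv x 2 ≤ n then
                PySem.List.pyGetD seq (PySem.Int.floordiv x 2 - 1) 0 else 0) - 1 ≤ (f1 : Int)
            · rw [if_pos hg, if_pos hg]; simp only [Option.map_some]; congr 1; ring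
            · rw [if_neg hg, if_neg hg]; rfl
          · rw [if_neg hvz]
            rw [ih f1 (by omega) (by omega) _ (l + 1)]
            cases pvLen f1 (PySem.Int.floordiv x 2) with
            | none => rfl
            | some w => simp only [Option.map_some]; congr 1; ring

-- the B-side memo is correct everywhere, and key 1 is present
def pvDictOK (d : PySem.Dict Int Int) : Prop :=
  (∀ k v, d.get? k = some v → pvC k = some v) ∧ (d.get? 1).isSome

theorem pvStep_pos (x : Int) (h : 2 ≤ x) : 1 ≤ pvStep x := by
  have hmb := PySem.Int.floordiv_mul_add_mod x 2
  have hm0 : 0 ≤ PySem.Int.mod x 2 := PySem.Int.mod_nonneg x (by norm_num)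
  have hm2 : PySem.Int.mod x 2 < 2 := PySem.Int.mod_lt x (by norm_num)
  unfold pvStep; split_ifs <;> omega

theorem pvBWalk_spec (d : PySem.Dict Int Int) (hd : pvDictOK d) :
    ∀ f, f ≤ pvFuelA → ∀ x path, 1 ≤ x →
      (pvLen f x = none → pvBWalk d f x path = none) ∧
      (∀ t, pvLen f x = some t →
        ∃ q b, pvBWalk d f x path = some (path ++ q, b) ∧ b + (q.length : Int) = t ∧
          ∀ i (h : i < q.length), pvC q[i] = some (b + ((q.length - i : Nat) : Int))) := by
  intro f
  induction f with
  | zero =>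
    intro hf x path hx1
    cases hget : d.get? x with
    | some v =>
      have hC : pvC x = some v := hd.1 x v hget
      unfold pvBWalk; rw [hget]
      dsimp only
      rw [pvLen_char hC hf]
      by_cases hg : v - 1 ≤ ((0 : Nat) : Int)
      · rw [if_pos hg, if_pos hg]
        refine ⟨fun h => absurd h (by simp), ?_⟩
        intro t ht
        obtain rfl : v = t := by simpa using ht
        exact ⟨[], v, by simp⟩
      · rw [if_neg hg, if_neg hg]
        exact ⟨fun _ => rfl, fun t ht => absurd ht (by simp)⟩
    | none =>
      have hx2 : 2 ≤ x := by
        rcases lt_or_ge x 2 with h | h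
        · obtain rfl : x = 1 := by omega
          have := hd.2; rw [hget] at this; simp at this
        · exact h
      unfold pvBWalk; rw [hget]
      dsimp only
      rw [pvLen_zero _ (by omega)]
      exact ⟨fun _ => rfl, fun t ht => absurd ht (by simp)⟩
  | succ f1 ih =>
    intro hf x path hx1
    cases hget : d.get? x with
    | some v =>
      have hC : pvC x = some v := hd.1 x v hget
      unfold pvBWalk; rw [hget]
      dsimp only
      rw [pvLen_char hC hf]
      by_cases hg : v - 1 ≤ ((f1 + 1 : Nat) : Int)
      · rw [if_pos hg, if_pos hg]
        refine ⟨fun h => absurd h (by simp), ?_⟩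
        intro t ht
        obtain rfl : v = t := by simpa using ht
        exact ⟨[], v, by simp⟩
      · rw [if_neg hg, if_neg hg]
        exact ⟨fun _ => rfl, fun t ht => absurd ht (by simp)⟩
    | none =>
      have hx2 : 2 ≤ x := by
        rcases lt_or_ge x 2 with h | h
        · obtain rfl : x = 1 := by omega
          have := hd.2; rw [hget] at this; simp at this
        · exact h
      have hstep : (if PySem.Int.mod x 2 = 0 then PySem.Int.floordiv x 2 else 3 * x + 1) = pvStep x := rfl
      have hx'1 : 1 ≤ pvStep x := pvStep_pos x hx2
      have hrec := ih (by omega) (pvStep x) (path ++ [x]) hx'1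
      have hunf : pvBWalk d (f1 + 1) x path = pvBWalk d f1 (pvStep x) (path ++ [x]) := by
        conv_lhs => rw [pvBWalk]
        rw [hget]; dsimp only; rw [hstep]
      rw [pvLen_succ _ _ (by omega : ¬ x ≤ 1), hunf]
      constructor
      · intro h
        exact hrec.1 (by simpa using h)
      · intro t ht
        obtain ⟨t', ht', rfl⟩ := Option.map_eq_some_iff.mp ht
        obtain ⟨q', b, hw, hlen', hq'⟩ := hrec.2 t' ht'
        refine ⟨x :: q', b, ?_, ?_, ?_⟩
        · rw [hw]; simp
        · simp only [List.length_cons]; push_cast; omega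
        · intro i hi
          cases i with
          | zero =>
            have hCx : pvC x = some (t' + 1) := by
              have : pvLen (f1 + 1) x = some (t' + 1) := by
                rw [pvLen_succ _ _ (by omega : ¬ x ≤ 1), ht']; rfl
              exact pvLen_mono this hf
            simp only [List.getElem_cons_zero]
            rw [hCx]; congr 1
            simp only [List.length_cons, Nat.sub_zero]; push_cast; omega
          | succ i' =>
            have hi' : i' < q'.length := by simpa using hi
            have heq : (x :: q').length - (i' + 1) = q'.length - i' := by simp
            simp only [List.getElem_cons_succ, heq]
            exact hq' i' hi'

theorem pvBackfill_ok (d : PySem.Dict Int Int) (hd : pvDictOK d) (q : List Int) (b : Int)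
    (hq : ∀ i (h : i < q.length), pvC q[i] = some (b + ((q.length - i : Nat) : Int))) :
    pvDictOK ((PySem.List.enumerate q.reverse 0).foldl
      (fun d p => d.insert p.2 (b + p.1 + 1)) d) := by
  have hins : ∀ p ∈ PySem.List.enumerate q.reverse 0, pvC p.2 = some (b + p.1 + 1) := by
    intro p hp
    rw [PySem.List.mem_enumerate_iff] at hp
    obtain ⟨k, hk, rfl⟩ := hp
    have hk' : k < q.length := by simpa using hk
    have hidx : q.length - 1 - k < q.length := by omega
    have hval := hq (q.length - 1 - k) hidx
    have harith : q.length - (q.length - 1 - k) = k + 1 := by omega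
    rw [harith] at hval
    have hrev : q.reverse[k] = q[q.length - 1 - k] := by
      rw [List.getElem_reverse]
    simp only [hrev, hval]
    congr 1; push_cast; ring
  suffices H : ∀ (l : List (Int × Int)) (d : PySem.Dict Int Int), pvDictOK d →
      (∀ p ∈ l, pvC p.2 = some (b + p.1 + 1)) →
      pvDictOK (l.foldl (fun d p => d.insert p.2 (b + p.1 + 1)) d) from
    H _ d hd hins
  intro l
  induction l with
  | nil => intro d hd _; exact hd
  | cons p l ih =>
    intro d hd hl
    simp only [List.foldl_cons]
    refine ih _ ⟨?_, ?_⟩ (fun p' hp' => hl p' (List.mem_cons_of_mem _ hp'))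
    · intro k v hk
      rw [PySem.Dict.get?_insert] at hk
      split_ifs at hk with hkp
      · obtain rfl := Option.some.injEq _ _ ▸ hk
        subst hkp
        simpa using hl p (List.mem_cons_self)
      · exact hd.1 k v hk
    · rw [PySem.Dict.get?_insert]
      split_ifs
      · simp
      · exact hd.2

-- canonical best-so-far fold both outer loops implement
def pvBest (st : Option (Int × Int)) (k : Int) : Option (Int × Int) :=
  st.bind fun bl => (pvC k).map (fun t => if t > bl.1 then (t, k) else bl)

theorem pvA_outer (n : Int) (hn : 1 ≤ n) : ∀ m : Nat, (m : Int) ≤ n →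
    ((PySem.List.pyRange 1 ((m : Int) + 1) 1).foldl pvBest (some (0, 0)) = none →
      (PySem.List.pyRange 1 ((m : Int) + 1) 1).foldl (pvAStep n)
        (some (List.replicate n.toNat 0, 0, 0)) = none) ∧
    (∀ bl, (PySem.List.pyRange 1 ((m : Int) + 1) 1).foldl pvBest (some (0, 0)) = some bl →
      ∃ seq, (PySem.List.pyRange 1 ((m : Int) + 1) 1).foldl (pvAStep n)
        (some (List.replicate n.toNat 0, 0, 0)) = some (seq, bl.1, bl.2) ∧
        seq.length = n.toNat ∧
        (∀ j (h : j < seq.length),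
          if (j : Int) + 1 ≤ (m : Int) then pvC ((j : Int) + 1) = some seq[j] ∧ seq[j] ≠ 0
          else seq[j] = 0)) := by
  intro m
  induction m with
  | zero =>
    intro _
    rw [PySem.List.pyRange_one_eq_nil (by norm_num)]
    simp only [List.foldl_nil]
    refine ⟨fun h => absurd h (by simp), ?_⟩
    intro bl hbl
    obtain rfl : ((0 : Int), (0 : Int)) = bl := by simpa using hbl
    refine ⟨List.replicate n.toNat 0, rfl, by simp, ?_⟩
    intro j h
    rw [if_neg (by omega)]
    simp
  | succ m ih =>
    intro hm
    have hcast : ((m + 1 : Nat) : Int) + 1 = ((m : Int) + 1) + 1 := by push_cast; ring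
    rw [hcast, PySem.List.pyRange_one_succ_right (by omega), List.foldl_append,
      List.foldl_append]
    simp only [List.foldl_cons, List.foldl_nil]
    obtain ⟨ih1, ih2⟩ := ih (by omega)
    cases hsp : (PySem.List.pyRange 1 ((m : Int) + 1) 1).foldl pvBest (some (0, 0)) with
    | none =>
      rw [ih1 hsp]
      exact ⟨fun _ => rfl, fun bl hbl => absurd hbl (by simp [pvBest])⟩
    | some bl0 =>
      obtain ⟨seq, hA1, hlen, hinv⟩ := ih2 bl0 hsp
      rw [hA1]
      -- evaluate A's step at x = m + 1
      have hmlt : m < seq.length := by rw [hlen]; omega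
      have hidx : ((m : Int) + 1) - 1 = (m : Int) := by ring
      have hget : PySem.List.pyGetD seq ((m : Int) + 1 - 1) 0 = seq[m] := by
        rw [hidx, PySem.List.pyGetD_natCast]
        exact List.getD_eq_getElem _ _ hmlt
      have hzero : seq[m] = 0 := by
        have := hinv m hmlt
        rwa [if_neg (by omega)] at this
      have hseqOK : pvSeqOK seq := by
        intro j hj hne
        have := hinv j hj
        split_ifs at this with hle
        · exact this.1
        · exact absurd this hne
      have hloop := pvALoop_spec n seq hseqOK hlen pvFuelA le_rfl ((m : Int) + 1) 1
      unfold pvAStep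
      dsimp only
      simp only [Nat.cast_add, Nat.cast_one]
      rw [hget, hzero]
      simp only [ne_eq, not_true_eq_false, if_false]
      rw [hloop]
      cases hc : pvLen pvFuelA ((m : Int) + 1) with
      | none =>
        simp only [Option.map_none]
        constructor
        · simp
        · intro bl hbl
          simp only [pvBest, Option.bind_some] at hbl
          rw [show pvC ((m : Int) + 1) = none from hc] at hbl
          simp at hbl
      | some t =>
        have ht0 : 1 + t - 1 = t := by ring
        simp only [Option.map_some, ht0]
        have hCt : pvC ((m : Int) + 1) = some t := hc
        have htpos : 1 ≤ t := (pvLen_bounds hc).1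
        have hsetlen : (PySem.List.pySetD seq ((m : Int) + 1 - 1) t).length = n.toNat := by
          rw [hidx, PySem.List.pySetD_natCast, List.length_set, hlen]
        have hset : PySem.List.pySetD seq ((m : Int) + 1 - 1) t = seq.set m t := by
          rw [hidx, PySem.List.pySetD_natCast]
        have hinv' : ∀ j (h : j < (seq.set m t).length),
            if (j : Int) + 1 ≤ ((m : Int) + 1) then
              pvC ((j : Int) + 1) = some (seq.set m t)[j] ∧ (seq.set m t)[j] ≠ 0
            else (seq.set m t)[j] = 0 := by
          intro j hj
          have hj' : j < seq.length := by simpa using hj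
          rw [List.getElem_set]
          by_cases hjm : m = j
          · subst hjm
            rw [if_pos rfl, if_pos (by omega)]
            exact ⟨hCt, by omega⟩
          · rw [if_neg hjm]
            have := hinv j hj'
            split_ifs at this ⊢ with h1 h2
            · exact this
            · omega
            · omega
            · exact this
        constructor
        · intro hnone
          simp only [pvBest, Option.bind_some] at hnone
          rw [show pvC ((m : Int) + 1) = some t from hc] at hnone
          simp at hnone
        · intro bl hbl
          simp only [pvBest, Option.bind_some] at hbl
          rw [show pvC ((m:Int)+1) = some t from hc] at hbl
          simp only [Option.map_some, Option.some.injEq] at hbl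
          subst hbl
          by_cases hlt : t > bl0.1
          · rw [if_pos hlt, if_pos hlt]
            exact ⟨seq.set m t, by rw [hset], hset ▸ hsetlen, hinv'⟩
          · rw [if_neg hlt, if_neg hlt]
            exact ⟨seq.set m t, by rw [hset], hset ▸ hsetlen, hinv'⟩

theorem pvB_outer (n : Int) (_hn : 1 ≤ n) : ∀ m : Nat, (m : Int) ≤ n →
    ((PySem.List.pyRange 1 ((m : Int) + 1) 1).foldl pvBest (some (0, 0)) = none →
      (PySem.List.pyRange 1 ((m : Int) + 1) 1).foldl pvBStep
        (some (PySem.Dict.ofList [(1, 1)], 0, 0)) = none) ∧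
    (∀ bl, (PySem.List.pyRange 1 ((m : Int) + 1) 1).foldl pvBest (some (0, 0)) = some bl →
      ∃ memo, (PySem.List.pyRange 1 ((m : Int) + 1) 1).foldl pvBStep
        (some (PySem.Dict.ofList [(1, 1)], 0, 0)) = some (memo, bl.1, bl.2) ∧ pvDictOK memo) := by
  intro m
  induction m with
  | zero =>
    intro _
    rw [PySem.List.pyRange_one_eq_nil (by norm_num)]
    simp only [List.foldl_nil]
    refine ⟨fun h => absurd h (by simp), ?_⟩
    intro bl hbl
    obtain rfl : ((0 : Int), (0 : Int)) = bl := by simpa using hbl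
    refine ⟨PySem.Dict.ofList [(1, 1)], rfl, ?_, ?_⟩
    · intro k v hk
      have hof : PySem.Dict.ofList [((1 : Int), (1 : Int))] =
          (PySem.Dict.empty : PySem.Dict Int Int).insert 1 1 := by decide
      rw [hof, PySem.Dict.get?_insert] at hk
      split_ifs at hk with h1
      · subst h1
        obtain rfl : (1 : Int) = v := by simpa using hk
        exact pvLen_of_le _ _ (by norm_num)
      · rw [PySem.Dict.get?_empty] at hk; cases hk
    · have hof : PySem.Dict.ofList [((1 : Int), (1 : Int))] =
          (PySem.Dict.empty : PySem.Dict Int Int).insert 1 1 := by decide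
      rw [hof, PySem.Dict.get?_insert]; simp
  | succ m ih =>
    intro hm
    have hcast : ((m + 1 : Nat) : Int) + 1 = ((m : Int) + 1) + 1 := by push_cast; ring
    rw [hcast, PySem.List.pyRange_one_succ_right (by omega), List.foldl_append,
      List.foldl_append]
    simp only [List.foldl_cons, List.foldl_nil]
    obtain ⟨ih1, ih2⟩ := ih (by omega)
    cases hsp : (PySem.List.pyRange 1 ((m : Int) + 1) 1).foldl pvBest (some (0, 0)) with
    | none =>
      rw [ih1 hsp]
      exact ⟨fun _ => rfl, fun bl hbl => absurd hbl (by simp [pvBest])⟩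
    | some bl0 =>
      obtain ⟨memo, hB1, hdOK⟩ := ih2 bl0 hsp
      rw [hB1]
      unfold pvBStep
      dsimp only
      have hwalk := pvBWalk_spec memo hdOK pvFuelB le_rfl ((m : Int) + 1) [] (by omega)
      cases hc : pvLen pvFuelB ((m : Int) + 1) with
      | none =>
        rw [hwalk.1 hc]
        constructor
        · exact fun _ => rfl
        · intro bl hbl
          simp only [pvBest, Option.bind_some] at hbl
          rw [show pvC ((m : Int) + 1) = none from hc] at hbl
          simp at hbl
      | some t =>
        obtain ⟨q, b, hw, hlen', hq⟩ := hwalk.2 t hc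
        rw [hw]
        dsimp only
        have hOK' := pvBackfill_ok memo hdOK q b (by simpa using hq)
        have hlenq : b + PySem.List.len ([] ++ q : List Int) = t := by
          simpa [PySem.List.len_eq] using hlen'
        constructor
        · intro hnone
          simp only [pvBest, Option.bind_some] at hnone
          rw [show pvC ((m : Int) + 1) = some t from hc] at hnone
          simp at hnone
        · intro bl hbl
          simp only [pvBest, Option.bind_some] at hbl
          rw [show pvC ((m : Int) + 1) = some t from hc] at hbl
          simp only [Option.map_some, Option.some.injEq] at hbl
          subst hbl
          rw [hlenq]
          by_cases hlt : t > bl0.1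
          · rw [if_pos hlt, if_pos hlt]
            exact ⟨_, rfl, by simpa using hOK'⟩
          · rw [if_neg hlt, if_neg hlt]
            exact ⟨_, rfl, by simpa using hOK'⟩

-- ===== VERDICT (by name: the statement is the Claim_ definition above) =====
theorem max_collatz_length_spec : Claim_equal_max_collatz_length := by
  intro n _
  unfold Spec_max_collatz_length max_collatz_length max_collatz_length_alt
  by_cases hn : n < 1
  · simp [hn]
  · simp only [hn, if_false]
    have hn1 : 1 ≤ n := by omega
    have hm : ((n.toNat : Int)) = n := by omega
    have hA := pvA_outer n hn1 n.toNat (by omega)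
    have hB := pvB_outer n hn1 n.toNat (by omega)
    rw [hm] at hA hB
    cases hsp : (PySem.List.pyRange 1 (n + 1) 1).foldl pvBest (some (0, 0)) with
    | none => rw [hA.1 hsp, hB.1 hsp]
    | some bl =>
      obtain ⟨seq, hA1, -⟩ := hA.2 bl hsp
      obtain ⟨memo, hB1, -⟩ := hB.2 bl hsp
      rw [hA1, hB1]
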